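-- pv_equiv track=rewrite | github.com/RobertMarch/AdventOfCode2020 | advent24a.py | parse_route
-- ===== SOURCE A (Python) =====
-- def parse_route(route):
--     steps = []
--     curr_step = ''
--     for c in route:
--         curr_step += c
--         if c not in 'ns':
--             steps.append(curr_step)
--             curr_step = ''
--
--     return steps
-- ===== SOURCE B (Python) =====
-- import re
--
-- def parse_route(route):
--     # One regex pass: each token is a maximal run of 'n'/'s' prefix chars
--     # followed by exactly one non-'ns' terminator; trailing n/s runs drop.
--     return re.findall(r'[ns]*[^ns]', route)
-- ===== Notes on version B (the rewrite author's own statement) =====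
-- stated objective: idiomatic
-- what changed: Replaces the explicit character-accumulation loop and mutable token buffer with a single re.findall over the pattern [ns]*[^ns], whose matches are exactly A's tokens.
import Mathlib
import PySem

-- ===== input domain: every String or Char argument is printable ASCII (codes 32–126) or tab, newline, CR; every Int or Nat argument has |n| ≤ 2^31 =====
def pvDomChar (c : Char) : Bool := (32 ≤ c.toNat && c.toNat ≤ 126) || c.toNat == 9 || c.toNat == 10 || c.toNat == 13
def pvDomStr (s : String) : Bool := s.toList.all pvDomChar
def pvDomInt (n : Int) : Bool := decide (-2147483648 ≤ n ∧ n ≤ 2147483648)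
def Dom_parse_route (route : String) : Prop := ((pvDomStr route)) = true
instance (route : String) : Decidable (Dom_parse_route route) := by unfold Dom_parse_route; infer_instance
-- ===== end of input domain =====

-- B replaces A's explicit accumulation loop with one regex findall pass ([ns]*[^ns]); idiomatic, same behaviour.


-- ===== PORT A =====
-- literal port: fold over the characters with state (steps, curr_step);
-- `c not in 'ns'` is `!(c == 'n' || c == 's')`.
def parse_route (route : String) : List String :=
  let st := route.toList.foldl
    (fun (st : List String × List Char) c =>
      let curr := st.2 ++ [c]
      if !(c == 'n' || c == 's') then (st.1 ++ [String.ofList curr], [])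
      else (st.1, curr))
    ([], [])
  st.1

-- ===== PORT B =====
-- hand-port of re.findall(r'[ns]*[^ns]', route): at each scan position the match
-- greedily takes the run of 'n'/'s' ([ns]*) then exactly one non-ns char ([^ns]);
-- if no terminator remains the match fails and scanning ends.  Exact for this pattern.
def pvNS (c : Char) : Bool := c == 'n' || c == 's'

def parseRouteRe (cs : List Char) : List String :=
  match h : cs.dropWhile pvNS with
  | [] => []
  | d :: rest => String.ofList (cs.takeWhile pvNS ++ [d]) :: parseRouteRe rest
termination_by cs.length
decreasing_by
  have := List.length_dropWhile_le pvNS cs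
  rw [h] at this
  simp at this
  omega

def parse_route_alt (route : String) : List String := parseRouteRe route.toList

-- ===== PRECONDITION & SPEC =====
def Spec_parse_route (route : String) (out : List String) : Prop := out = parse_route_alt route
instance (route : String) (out : List String) : Decidable (Spec_parse_route route out) := by unfold Spec_parse_route; infer_instance

-- ===== CLAIM (what is proved, stated in full; the proofs are below) =====
def Claim_equal_parse_route : Prop := ∀ (route : String), Dom_parse_route route → Spec_parse_route route (parse_route route)

-- ===== LEMMAS AND PROOFS =====

theorem takeWhile_all_append (p : Char → Bool) (pre rest : List Char)
    (hpre : ∀ c ∈ pre, p c = true) :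
    (pre ++ rest).takeWhile p = pre ++ rest.takeWhile p := by
  induction pre with
  | nil => simp
  | cons a l ih =>
    have ha : p a = true := hpre a (by simp)
    simp [ha, ih (fun c hc => hpre c (by simp [hc]))]

theorem dropWhile_all_append (p : Char → Bool) (pre rest : List Char)
    (hpre : ∀ c ∈ pre, p c = true) :
    (pre ++ rest).dropWhile p = rest.dropWhile p := by
  induction pre with
  | nil => simp
  | cons a l ih =>
    have ha : p a = true := hpre a (by simp)
    simp [ha, ih (fun c hc => hpre c (by simp [hc]))]

theorem parseRouteRe_all_ns (cs : List Char) (h : ∀ c ∈ cs, pvNS c = true) :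
    parseRouteRe cs = [] := by
  have hd : cs.dropWhile pvNS = [] := by
    rw [List.dropWhile_eq_nil_iff]; exact h
  rw [parseRouteRe]
  split
  · rfl
  · rename_i d rest heq
    rw [hd] at heq; cases heq

theorem parseRouteRe_step (curr : List Char) (c : Char) (rest : List Char)
    (hcurr : ∀ x ∈ curr, pvNS x = true) (hc : pvNS c = false) :
    parseRouteRe (curr ++ c :: rest)
      = String.ofList (curr ++ [c]) :: parseRouteRe rest := by
  have hdrop : (curr ++ c :: rest).dropWhile pvNS = c :: rest := by
    rw [dropWhile_all_append pvNS curr _ hcurr]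
    simp [List.dropWhile, hc]
  have htake : (curr ++ c :: rest).takeWhile pvNS = curr := by
    rw [takeWhile_all_append pvNS curr _ hcurr]
    simp [List.takeWhile, hc]
  rw [parseRouteRe]
  split
  · rename_i heq; rw [hdrop] at heq; cases heq
  · rename_i d rest1 heq
    rw [hdrop] at heq
    injection heq with h1 h2
    subst h1; subst h2
    rw [htake]

-- loop invariant for A's fold: the pending curr_step consists only of n/s characters
theorem foldA_eq (cs : List Char) : ∀ (steps : List String) (curr : List Char),
    (∀ c ∈ curr, pvNS c = true) →
    (cs.foldl
      (fun (st : List String × List Char) c =>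
        if !(c == 'n' || c == 's') then (st.1 ++ [String.ofList (st.2 ++ [c])], [])
        else (st.1, st.2 ++ [c]))
      (steps, curr)).1 = steps ++ parseRouteRe (curr ++ cs) := by
  induction cs with
  | nil =>
    intro steps curr hcurr
    simp [parseRouteRe_all_ns curr hcurr]
  | cons c rest ih =>
    intro steps curr hcurr
    by_cases hns : pvNS c = true
    · have hns' : (c == 'n' || c == 's') = true := hns
      rw [List.foldl_cons, if_neg (by simp [hns'])]
      have := ih steps (curr ++ [c])
        (by intro x hx
            rcases List.mem_append.mp hx with h1 | h1
            · exact hcurr x h1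
            · simp at h1; subst h1; exact hns)
      rw [this, List.append_assoc]
      rfl
    · have hns0 : pvNS c = false := by simpa using hns
      have hns' : (c == 'n' || c == 's') = false := by simpa [pvNS] using hns0
      rw [List.foldl_cons, if_pos (by simp [hns'])]
      rw [parseRouteRe_step curr c rest hcurr hns0]
      rw [ih (steps ++ [String.ofList (curr ++ [c])]) [] (by simp)]
      simp

-- ===== VERDICT (by name: the statement is the Claim_ definition above) =====
theorem parse_route_spec : Claim_equal_parse_route := by
  intro route _
  unfold Spec_parse_route parse_route parse_route_alt
  simpa using foldA_eq route.toList [] [] (by simp)
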